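-- pv_equiv track=rewrite | github.com/sunminky/algorythmStudy | 알고리즘 스터디/개인공부/SegmentTree/Histogram.py | inflate_tree
-- ===== SOURCE A (Python) =====
-- from math import log2, ceil
--
-- def inflate_tree(block):
--     height = ceil(log2(len(block)))
--     tree = [-1 for _ in range(2 << height)]
--     end_node = 1 << height
--
--     for i in range(len(block)):
--         tree[end_node + i] = i
--
--     end_node >>= 1
--     while end_node != 0:
--         for i in range(end_node):
--             if tree[(end_node + i) * 2] == -1:
--                 tree[(end_node + i)] = tree[(end_node + i) * 2 + 1]
--             elif tree[(end_node + i) * 2 + 1] == -1: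
--                 tree[(end_node + i)] = tree[(end_node + i) * 2]
--             else:
--                 if block[tree[(end_node + i) * 2]] > block[tree[(end_node + i) * 2 + 1]]:
--                     tree[(end_node + i)] = tree[(end_node + i) * 2 + 1]
--                 else:
--                     tree[(end_node + i)] = tree[(end_node + i) * 2]
--
--         end_node >>= 1
--
--     return tree
-- ===== SOURCE B (Python) =====
-- from math import log2, ceil
--
-- def inflate_tree(block):
--     height = ceil(log2(len(block)))
--     size = 1 << height
--
--     def val(node):
--         if node >= size:
--             i = node - size
--             return i if i < len(block) else -1
--         left = val(2 * node)
--         right = val(2 * node + 1)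
--         if left == -1:
--             return right
--         if right == -1:
--             return left
--         return right if block[left] > block[right] else left
--
--     return [-1] + [val(node) for node in range(1, 2 * size)]
-- ===== Notes on version B (the rewrite author's own statement) =====
-- stated objective: alternative
-- what changed: Replaces A's mutable array filled by iterative bottom-up level sweeps with a pure recursive per-node value function mapped over all node indices; Pre_ only excludes the empty list, on which both A and B raise ValueError (log2(0)).
import Mathlib
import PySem

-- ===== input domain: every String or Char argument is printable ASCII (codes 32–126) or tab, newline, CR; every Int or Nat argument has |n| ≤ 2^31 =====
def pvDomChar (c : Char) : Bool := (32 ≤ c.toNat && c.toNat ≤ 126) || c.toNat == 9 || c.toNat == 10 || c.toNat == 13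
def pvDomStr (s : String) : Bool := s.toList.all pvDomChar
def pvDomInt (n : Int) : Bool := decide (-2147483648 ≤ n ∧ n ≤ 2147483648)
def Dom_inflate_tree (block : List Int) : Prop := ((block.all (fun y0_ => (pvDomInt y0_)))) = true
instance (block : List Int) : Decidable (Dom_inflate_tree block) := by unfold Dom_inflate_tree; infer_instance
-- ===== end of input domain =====

-- B replaces A's in-place array updated by iterative bottom-up level sweeps with a pure
-- recursive per-node value function mapped over all node indices (objective: alternative).

-- ===== PORT A =====
-- block[v] for an index v stored in the tree; v is always a valid non-negative index
-- when it is not -1 (established in the lemmas), so pyGet?'s default is never used.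
def pvBlockAt (block : List Int) (v : Int) : Int := (PySem.List.pyGet? block v).getD 0

-- one iteration of A's inner `for i in range(end_node)` body; tree indices are always
-- in range on admitted inputs (proved below), so getD's default is never used.
def pvStepA (block : List Int) (e : Nat) (t : List Int) (i : Nat) : List Int :=
  let l := t.getD ((e + i) * 2) (-1)
  let r := t.getD ((e + i) * 2 + 1) (-1)
  if l = -1 then t.set (e + i) r
  else if r = -1 then t.set (e + i) l
  else if pvBlockAt block l > pvBlockAt block r then t.set (e + i) r
  else t.set (e + i) l

-- A's `while end_node != 0` loop (end_node halves each pass)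
def pvLevels (block : List Int) (e : Nat) (t : List Int) : List Int :=
  if h : e = 0 then t
  else pvLevels block (e / 2) ((List.range e).foldl (pvStepA block e) t)
termination_by e
decreasing_by exact Nat.div_lt_self (Nat.pos_of_ne_zero h) one_lt_two

-- Nat.clog 2 n = ceil(log2 n) for n ≥ 1; Python's log2 raises on n = 0 (excluded by Pre_)
def inflate_tree (block : List Int) : List Int :=
  let height := Nat.clog 2 block.length
  let t0 := List.replicate (2 <<< height) (-1 : Int)
  let endNode := 1 <<< height
  let t1 := (List.range block.length).foldl (fun t i => t.set (endNode + i) (Int.ofNat i)) t0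
  pvLevels block (endNode / 2) t1

-- ===== PORT B =====
-- block[v] in Source B's val; v is always a valid non-negative index when it is not -1
def pvBlockAtB (block : List Int) (v : Int) : Int := (PySem.List.pyGet? block v).getD 0

-- Source B's recursive `val`; the fuel argument only makes the recursion structural and is
-- never exhausted on the calls inflate_tree_alt makes (leaf test comes first).
def pvVal (block : List Int) (size : Nat) : Nat → Nat → Int
  | fuel, node =>
    if size ≤ node then (if node - size < block.length then ((node - size : Nat) : Int) else -1)
    else match fuel with
      | 0 => -1
      | f + 1 =>
        let left := pvVal block size f (2 * node)
        let right := pvVal block size f (2 * node + 1)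
        if left = -1 then right
        else if right = -1 then left
        else if pvBlockAtB block left > pvBlockAtB block right then right
        else left

def inflate_tree_alt (block : List Int) : List Int :=
  let height := Nat.clog 2 block.length
  let size := 1 <<< height
  (-1 : Int) :: (List.range' 1 (2 * size - 1)).map (fun node => pvVal block size (height + 1) node)

-- ===== PRECONDITION & SPEC =====
-- Pre_ excludes the empty list, on which Python's log2(0) raises ValueError.
def Pre_inflate_tree (block : List Int) : Prop := block ≠ []
instance (block : List Int) : Decidable (Pre_inflate_tree block) := by unfold Pre_inflate_tree; infer_instance
def pvWitness_inflate_tree : List Int := [3, 1, 2]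

def Spec_inflate_tree (block : List Int) (out : List Int) : Prop := out = inflate_tree_alt block
instance (block : List Int) (out : List Int) : Decidable (Spec_inflate_tree block out) := by unfold Spec_inflate_tree; infer_instance

-- ===== CLAIM (what is proved, stated in full; the proofs are below) =====
def Claim_equal_inflate_tree : Prop := ∀ (block : List Int), Dom_inflate_tree block → Pre_inflate_tree block → Spec_inflate_tree block (inflate_tree block)

-- ===== LEMMAS AND PROOFS =====

-- merge of two child entries, as both ports compute it
def pvMerge (block : List Int) (l r : Int) : Int :=
  if l = -1 then r
  else if r = -1 then l
  else if pvBlockAt block l > pvBlockAt block r then r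
  else l

theorem pvGetD_set_eq (l : List Int) (i : Nat) (a d : Int) (h : i < l.length) :
    (l.set i a).getD i d = a := by
  simp [List.getD_eq_getElem?_getD, h]

theorem pvGetD_set_ne (l : List Int) (i : Nat) (a d : Int) (j : Nat) (h : j ≠ i) :
    (l.set i a).getD j d = l.getD j d := by
  simp [List.getD_eq_getElem?_getD, List.getElem?_set_ne (Ne.symm h)]

theorem pvVal_leaf (block : List Int) (size f node : Nat) (h : size ≤ node) :
    pvVal block size f node =
      if node - size < block.length then ((node - size : Nat) : Int) else -1 := by
  cases f <;> simp [pvVal, h]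

theorem pvVal_stable (block : List Int) (size : Nat) :
    ∀ (f g node : Nat), size ≤ 2 ^ f * node → size ≤ 2 ^ g * node →
      pvVal block size f node = pvVal block size g node := by
  intro f
  induction f with
  | zero =>
    intro g node hf _
    simp only [pow_zero, one_mul] at hf
    rw [pvVal_leaf block size 0 node hf, pvVal_leaf block size g node hf]
  | succ f ih =>
    intro g node hf hg
    by_cases hle : size ≤ node
    · rw [pvVal_leaf block size _ node hle, pvVal_leaf block size g node hle]
    · cases g with
      | zero =>
        simp only [pow_zero, one_mul] at hg
        exact absurd hg hle
      | succ g =>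
        have h2f : size ≤ 2 ^ f * (2 * node) := by
          rw [← mul_assoc, mul_comm (2 ^ f) 2, ← pow_succ']; exact hf
        have h2g : size ≤ 2 ^ g * (2 * node) := by
          rw [← mul_assoc, mul_comm (2 ^ g) 2, ← pow_succ']; exact hg
        have h2f' : size ≤ 2 ^ f * (2 * node + 1) := le_trans h2f (by nlinarith [pow_pos (by norm_num : 0 < 2) f])
        have h2g' : size ≤ 2 ^ g * (2 * node + 1) := le_trans h2g (by nlinarith [pow_pos (by norm_num : 0 < 2) g])
        simp only [pvVal, if_neg hle]
        rw [ih g (2 * node) h2f h2g, ih g (2 * node + 1) h2f' h2g']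

theorem pvVal_node (block : List Int) (h node : Nat) (h1 : 1 ≤ node) (h2 : node < 2 ^ h) :
    pvVal block (2 ^ h) (h + 1) node =
      pvMerge block (pvVal block (2 ^ h) (h + 1) (2 * node))
        (pvVal block (2 ^ h) (h + 1) (2 * node + 1)) := by
  have hle : ¬ 2 ^ h ≤ node := not_le.mpr h2
  have hL : pvVal block (2 ^ h) h (2 * node) = pvVal block (2 ^ h) (h + 1) (2 * node) := by
    apply pvVal_stable
    · calc (2:ℕ) ^ h = 2 ^ h * 1 := (mul_one _).symm
        _ ≤ 2 ^ h * (2 * node) := by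
          exact Nat.mul_le_mul_left _ (by omega)
    · calc (2:ℕ) ^ h ≤ 2 ^ (h+1) := Nat.pow_le_pow_right (by norm_num) (by omega)
        _ = 2 ^ (h+1) * 1 := (mul_one _).symm
        _ ≤ 2 ^ (h+1) * (2 * node) := Nat.mul_le_mul_left _ (by omega)
  have hR : pvVal block (2 ^ h) h (2 * node + 1) = pvVal block (2 ^ h) (h + 1) (2 * node + 1) := by
    apply pvVal_stable
    · calc (2:ℕ) ^ h = 2 ^ h * 1 := (mul_one _).symm
        _ ≤ 2 ^ h * (2 * node + 1) := Nat.mul_le_mul_left _ (by omega)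
    · calc (2:ℕ) ^ h ≤ 2 ^ (h+1) := Nat.pow_le_pow_right (by norm_num) (by omega)
        _ = 2 ^ (h+1) * 1 := (mul_one _).symm
        _ ≤ 2 ^ (h+1) * (2 * node + 1) := Nat.mul_le_mul_left _ (by omega)
  conv_lhs => rw [pvVal]
  simp only [if_neg hle, pvMerge, pvBlockAtB, pvBlockAt, hL, hR]
  rfl

theorem pvStepA_eq (block : List Int) (e : Nat) (t : List Int) (i : Nat) :
    pvStepA block e t i =
      t.set (e + i) (pvMerge block (t.getD ((e + i) * 2) (-1)) (t.getD ((e + i) * 2 + 1) (-1))) := by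
  simp only [pvStepA, pvMerge]
  split_ifs <;> rfl

theorem pvLeafFold_len (size : Nat) (t0 : List Int) (k : Nat) :
    ((List.range k).foldl (fun t i => t.set (size + i) (Int.ofNat i)) t0).length = t0.length := by
  induction k with
  | zero => simp
  | succ k ih => rw [List.range_succ, List.foldl_append]; simpa using ih

theorem pvLeafFold_getD (size : Nat) (t0 : List Int) (k j : Nat) (hk : size + k ≤ t0.length) :
    ((List.range k).foldl (fun t i => t.set (size + i) (Int.ofNat i)) t0).getD j (-1) =
      if size ≤ j ∧ j < size + k then ((j - size : Nat) : Int) else t0.getD j (-1) := by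
  induction k with
  | zero =>
    simp only [List.range_zero, List.foldl_nil]
    rw [if_neg (by omega)]
  | succ k ih =>
    rw [List.range_succ, List.foldl_append]
    simp only [List.foldl_cons, List.foldl_nil]
    by_cases hj : j = size + k
    · subst hj
      rw [pvGetD_set_eq _ _ _ _ (by rw [pvLeafFold_len]; omega), if_pos (by omega)]
      congr 1
      omega
    · rw [pvGetD_set_ne _ _ _ _ _ hj, ih (by omega)]
      by_cases hc : size ≤ j ∧ j < size + k
      · rw [if_pos hc, if_pos (by omega)]
      · rw [if_neg hc, if_neg (by omega)]

theorem pvInnerFold_spec (block : List Int) (h e : Nat) (hes : 2 * e ≤ 2 ^ h)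
    (t : List Int) (hlen : t.length = 2 * 2 ^ h)
    (hup : ∀ j, 2 * e ≤ j → j < 2 * 2 ^ h → t.getD j (-1) = pvVal block (2 ^ h) (h + 1) j) :
    ∀ k, k ≤ e →
      ((List.range k).foldl (pvStepA block e) t).length = 2 * 2 ^ h ∧
      (∀ j, j < e ∨ e + k ≤ j →
        ((List.range k).foldl (pvStepA block e) t).getD j (-1) = t.getD j (-1)) ∧
      (∀ i, i < k →
        ((List.range k).foldl (pvStepA block e) t).getD (e + i) (-1) =
          pvVal block (2 ^ h) (h + 1) (e + i)) := by
  intro k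
  induction k with
  | zero => exact fun _ => ⟨hlen, fun _ _ => rfl, fun i hi => absurd hi (by omega)⟩
  | succ k ih =>
    intro hke
    obtain ⟨ihlen, ihout, ihin⟩ := ih (by omega)
    rw [List.range_succ, List.foldl_append]
    simp only [List.foldl_cons, List.foldl_nil]
    rw [pvStepA_eq]
    have hlval : ((List.range k).foldl (pvStepA block e) t).getD ((e + k) * 2) (-1) =
        pvVal block (2 ^ h) (h + 1) (2 * (e + k)) := by
      rw [ihout _ (by omega), hup _ (by omega) (by omega)]
      congr 1
      ring
    have hrval : ((List.range k).foldl (pvStepA block e) t).getD ((e + k) * 2 + 1) (-1) =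
        pvVal block (2 ^ h) (h + 1) (2 * (e + k) + 1) := by
      rw [ihout _ (by omega), hup _ (by omega) (by omega)]
      congr 1
      ring
    refine ⟨by simp [ihlen], ?_, ?_⟩
    · intro j hj
      rw [pvGetD_set_ne _ _ _ _ _ (by omega), ihout _ (by omega)]
    · intro i hi
      by_cases hik : i = k
      · subst hik
        rw [pvGetD_set_eq _ _ _ _ (by omega), hlval, hrval,
          ← pvVal_node block h (e + i) (by omega) (by omega)]
      · rw [pvGetD_set_ne _ _ _ _ _ (by omega), ihin _ (by omega)]

theorem pvLevels_spec (block : List Int) (h : Nat) :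
    ∀ (k : Nat) (t : List Int), 2 ^ (k + 1) ≤ 2 ^ h →
      t.length = 2 * 2 ^ h → t.getD 0 (-1) = -1 →
      (∀ j, 2 * 2 ^ k ≤ j → j < 2 * 2 ^ h → t.getD j (-1) = pvVal block (2 ^ h) (h + 1) j) →
      (pvLevels block (2 ^ k) t).length = 2 * 2 ^ h ∧
      (pvLevels block (2 ^ k) t).getD 0 (-1) = -1 ∧
      (∀ j, 1 ≤ j → j < 2 * 2 ^ h →
        (pvLevels block (2 ^ k) t).getD j (-1) = pvVal block (2 ^ h) (h + 1) j) := by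
  intro k
  induction k with
  | zero =>
    intro t hk hlen h0 hup
    rw [pow_zero]
    rw [pvLevels, dif_neg one_ne_zero, show (1:ℕ)/2 = 0 from rfl, pvLevels, dif_pos rfl]
    obtain ⟨glen, gout, gin⟩ :=
      pvInnerFold_spec block h 1 (by simpa using hk) t hlen (by simpa using hup) 1 le_rfl
    refine ⟨glen, ?_, ?_⟩
    · rw [gout 0 (by omega), h0]
    · intro j h1j hj
      by_cases hj1 : j = 1
      · subst hj1
        simpa using gin 0 (by omega)
      · rw [gout j (by omega), hup j (by omega) hj]
  | succ k ih =>
    intro t hk hlen h0 hup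
    have hpos : (0:ℕ) < 2 ^ (k + 1) := Nat.two_pow_pos _
    have hdiv : 2 ^ (k + 1) / 2 = 2 ^ k := by
      rw [pow_succ, Nat.mul_div_cancel _ (by norm_num)]
    have h2e : 2 * 2 ^ (k + 1) = 2 ^ (k + 2) := by ring
    rw [pvLevels, dif_neg (by omega), hdiv]
    obtain ⟨glen, gout, gin⟩ :=
      pvInnerFold_spec block h (2 ^ (k + 1)) (by omega) t hlen hup (2 ^ (k + 1)) le_rfl
    apply ih
    · calc 2 ^ (k + 1) ≤ 2 ^ (k + 2) := Nat.pow_le_pow_right (by norm_num) (by omega)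
        _ ≤ 2 ^ h := by omega
    · exact glen
    · rw [gout 0 (by omega), h0]
    · intro j hj hj2
      have hj' : 2 ^ (k + 1) ≤ j := by
        have : 2 * 2 ^ k = 2 ^ (k + 1) := by ring
        omega
      by_cases hcase : j < 2 * 2 ^ (k + 1)
      · have := gin (j - 2 ^ (k + 1)) (by omega)
        have hje : 2 ^ (k + 1) + (j - 2 ^ (k + 1)) = j := by omega
        rwa [hje] at this
      · rw [gout j (by omega), hup j (by omega) hj2]

theorem pvMain (block : List Int) (h : Nat) (hnsize : block.length ≤ 2 ^ h) :
    pvLevels block (2 ^ h / 2)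
        ((List.range block.length).foldl (fun t i => t.set (2 ^ h + i) (Int.ofNat i))
          (List.replicate (2 * 2 ^ h) (-1))) =
      (-1) :: (List.range' 1 (2 * 2 ^ h - 1)).map
        (fun node => pvVal block (2 ^ h) (h + 1) node) := by
  have hpos : (0:ℕ) < 2 ^ h := Nat.two_pow_pos _
  have hk' : 2 ^ h + block.length ≤ (List.replicate (2 * 2 ^ h) (-1 : Int)).length := by
    simp only [List.length_replicate]; omega
  have hrep : ∀ j, (List.replicate (2 * 2 ^ h) (-1 : Int)).getD j (-1) = -1 := by
    intro j
    simp [List.getD_eq_getElem?_getD, List.getElem?_replicate]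
    split <;> rfl
  have hlen1 : ((List.range block.length).foldl (fun t i => t.set (2 ^ h + i) (Int.ofNat i))
      (List.replicate (2 * 2 ^ h) (-1 : Int))).length = 2 * 2 ^ h := by
    rw [pvLeafFold_len]; simp
  have h0 : ((List.range block.length).foldl (fun t i => t.set (2 ^ h + i) (Int.ofNat i))
      (List.replicate (2 * 2 ^ h) (-1 : Int))).getD 0 (-1) = -1 := by
    rw [pvLeafFold_getD _ _ _ _ hk', if_neg (by omega), hrep]
  have hleaf : ∀ j, 2 ^ h ≤ j → j < 2 * 2 ^ h →
      ((List.range block.length).foldl (fun t i => t.set (2 ^ h + i) (Int.ofNat i))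
        (List.replicate (2 * 2 ^ h) (-1 : Int))).getD j (-1) =
        pvVal block (2 ^ h) (h + 1) j := by
    intro j hj hj2
    rw [pvLeafFold_getD _ _ _ _ hk', pvVal_leaf _ _ _ _ hj]
    by_cases hc : j - 2 ^ h < block.length
    · rw [if_pos ⟨hj, by omega⟩, if_pos hc]
    · rw [if_neg (by omega), if_neg hc, hrep]
  have post : (pvLevels block (2 ^ h / 2)
        ((List.range block.length).foldl (fun t i => t.set (2 ^ h + i) (Int.ofNat i))
          (List.replicate (2 * 2 ^ h) (-1 : Int)))).length = 2 * 2 ^ h ∧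
      (pvLevels block (2 ^ h / 2)
        ((List.range block.length).foldl (fun t i => t.set (2 ^ h + i) (Int.ofNat i))
          (List.replicate (2 * 2 ^ h) (-1 : Int)))).getD 0 (-1) = -1 ∧
      ∀ j, 1 ≤ j → j < 2 * 2 ^ h →
        (pvLevels block (2 ^ h / 2)
          ((List.range block.length).foldl (fun t i => t.set (2 ^ h + i) (Int.ofNat i))
            (List.replicate (2 * 2 ^ h) (-1 : Int)))).getD j (-1) =
          pvVal block (2 ^ h) (h + 1) j := by
    cases h with
    | zero =>
      rw [show (2:ℕ) ^ 0 / 2 = 0 from rfl, pvLevels, dif_pos rfl]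
      refine ⟨hlen1, h0, ?_⟩
      intro j hj hj2
      have hj1 : j = 1 := by norm_num at hj2; omega
      subst hj1
      exact hleaf 1 (by norm_num) hj2
    | succ k =>
      rw [show (2:ℕ) ^ (k + 1) / 2 = 2 ^ k by
        rw [pow_succ, Nat.mul_div_cancel _ (by norm_num)]]
      exact pvLevels_spec block (k + 1) k _ le_rfl hlen1 h0
        (fun j hj hj2 => hleaf j (by rw [pow_succ']; exact hj) hj2)
  obtain ⟨plen, p0, pj⟩ := post
  apply List.ext_getElem
  · rw [plen]
    simp only [List.length_cons, List.length_map, List.length_range']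
    omega
  · intro i h1 h2
    have hi : i < 2 * 2 ^ h := by rwa [plen] at h1
    rw [show (pvLevels block (2 ^ h / 2)
        ((List.range block.length).foldl (fun t i => t.set (2 ^ h + i) (Int.ofNat i))
          (List.replicate (2 * 2 ^ h) (-1 : Int))))[i] =
        (pvLevels block (2 ^ h / 2)
        ((List.range block.length).foldl (fun t i => t.set (2 ^ h + i) (Int.ofNat i))
          (List.replicate (2 * 2 ^ h) (-1 : Int)))).getD i (-1) from
      (List.getD_eq_getElem _ _ h1).symm]
    cases i with
    | zero => simpa using p0
    | succ m =>
      rw [pj (m + 1) (by omega) hi]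
      rw [List.getElem_cons_succ]
      rw [List.getElem_map]
      rw [List.getElem_range'_1]
      rw [Nat.add_comm 1 m]

-- ===== VERDICT (by name: the statement is the Claim_ definition above) =====
theorem inflate_tree_spec : Claim_equal_inflate_tree := by
  intro block _hdom _hpre
  unfold Spec_inflate_tree inflate_tree inflate_tree_alt
  simp only [Nat.shiftLeft_eq, one_mul]
  exact pvMain block (Nat.clog 2 block.length) (Nat.le_pow_clog (by norm_num) _)
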